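-- pv_equiv track=rewrite | github.com/jimmynguyen/daily-programmer | python/c001h.py | getMostRecentHighAndLowGuesses
-- ===== SOURCE A (Python) =====
-- HI_CHAR = 'h'
--
-- def getMostRecentHighAndLowGuesses(guesses):
-- 	hi = None
-- 	lo = None
-- 	for _, guess in enumerate(guesses):
-- 		if guess[1] == HI_CHAR:
-- 			hi = guess[0]
-- 		else:
-- 			lo = guess[0]
-- 	return hi, lo
-- ===== SOURCE B (Python) =====
-- HI_CHAR = 'h'
--
-- def getMostRecentHighAndLowGuesses(guesses):
--     hi = None
--     lo = None
--     for value, kind in reversed(guesses):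
--         if kind == HI_CHAR:
--             if hi is None:
--                 hi = value
--         elif lo is None:
--             lo = value
--         if hi is not None and lo is not None:
--             break
--     return hi, lo
-- ===== Notes on version B (the rewrite author's own statement) =====
-- stated objective: alternative
-- what changed: B scans the guesses back-to-front, keeping only the first high and first low it meets and stopping early once both are found, instead of A's forward pass that unconditionally overwrites both slots.
import Mathlib
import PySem

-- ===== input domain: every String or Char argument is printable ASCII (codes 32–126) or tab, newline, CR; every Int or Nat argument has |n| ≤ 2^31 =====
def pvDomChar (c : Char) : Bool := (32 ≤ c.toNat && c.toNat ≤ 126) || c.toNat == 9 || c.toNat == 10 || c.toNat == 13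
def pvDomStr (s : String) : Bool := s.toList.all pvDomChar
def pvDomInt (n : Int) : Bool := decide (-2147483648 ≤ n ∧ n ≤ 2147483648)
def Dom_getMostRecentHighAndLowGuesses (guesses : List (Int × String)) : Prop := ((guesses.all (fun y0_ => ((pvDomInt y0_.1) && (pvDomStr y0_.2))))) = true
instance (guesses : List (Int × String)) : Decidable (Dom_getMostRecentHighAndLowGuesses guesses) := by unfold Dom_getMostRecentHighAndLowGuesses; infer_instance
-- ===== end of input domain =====

-- B scans the guesses back-to-front with early termination instead of A's forward overwrite pass; alternative decomposition, same cost.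


-- ===== PORT A =====
-- A: forward loop over enumerate(guesses) (index unused), unconditionally overwriting hi on an 'h' guess, lo otherwise.
def getMostRecentHighAndLowGuesses (guesses : List (Int × String)) : Option Int × Option Int :=
  (PySem.List.enumerate guesses).foldl
    (fun (s : Option Int × Option Int) p =>
      let guess := p.2
      if guess.2 == "h" then (some guess.1, s.2) else (s.1, some guess.1))
    (none, none)

-- ===== PORT B =====
-- B: recursion over reversed(guesses); keep the first high / first low seen, break once both are set.
def pvAltLoop (l : List (Int × String)) (hi lo : Option Int) : Option Int × Option Int :=
  match l with
  | [] => (hi, lo)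
  | (v, t) :: rest =>
    let hi' := if t == "h" then (if hi.isNone then some v else hi) else hi
    let lo' := if t == "h" then lo else (if lo.isNone then some v else lo)
    if hi'.isSome && lo'.isSome then (hi', lo') else pvAltLoop rest hi' lo'

def getMostRecentHighAndLowGuesses_alt (guesses : List (Int × String)) : Option Int × Option Int :=
  pvAltLoop guesses.reverse none none

-- ===== PRECONDITION & SPEC =====
def Spec_getMostRecentHighAndLowGuesses (guesses : List (Int × String)) (out : Option Int × Option Int) : Prop := out = getMostRecentHighAndLowGuesses_alt guesses
instance (guesses : List (Int × String)) (out : Option Int × Option Int) : Decidable (Spec_getMostRecentHighAndLowGuesses guesses out) := by unfold Spec_getMostRecentHighAndLowGuesses; infer_instance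

-- ===== CLAIM (what is proved, stated in full; the proofs are below) =====
def Claim_equal_getMostRecentHighAndLowGuesses : Prop := ∀ (guesses : List (Int × String)), Dom_getMostRecentHighAndLowGuesses guesses → Spec_getMostRecentHighAndLowGuesses guesses (getMostRecentHighAndLowGuesses guesses)

-- ===== LEMMAS AND PROOFS =====

-- first high / first low value of a list (used only as a proof-side characterisation)
def pvFH (l : List (Int × String)) : Option Int := (l.find? (fun p => p.2 == "h")).map Prod.fst
def pvFL (l : List (Int × String)) : Option Int := (l.find? (fun p => !(p.2 == "h"))).map Prod.fst

theorem pvAltLoop_eq (l : List (Int × String)) : ∀ hi lo,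
    pvAltLoop l hi lo = (hi.or (pvFH l), lo.or (pvFL l)) := by
  induction l with
  | nil => intro hi lo; simp [pvAltLoop, pvFH, pvFL]
  | cons p rest ih =>
    obtain ⟨v, t⟩ := p
    intro hi lo
    by_cases ht : t == "h" <;>
      cases hi <;> cases lo <;>
        simp [pvAltLoop, pvFH, pvFL, ht, ih, Option.or]

theorem pvFH_append (l₁ l₂ : List (Int × String)) :
    pvFH (l₁ ++ l₂) = (pvFH l₁).or (pvFH l₂) := by
  simp [pvFH, List.find?_append]
  cases List.find? (fun p => p.2 == "h") l₁ <;> simp [Option.or]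

theorem pvFL_append (l₁ l₂ : List (Int × String)) :
    pvFL (l₁ ++ l₂) = (pvFL l₁).or (pvFL l₂) := by
  simp [pvFL, List.find?_append]
  cases List.find? (fun p => !(p.2 == "h")) l₁ <;> simp [Option.or]

theorem pvFH_single (v : Int) (t : String) :
    pvFH [(v, t)] = (if t == "h" then some v else none) := by
  by_cases ht : t == "h" <;> simp [pvFH, List.find?, ht]

theorem pvFL_single (v : Int) (t : String) :
    pvFL [(v, t)] = (if t == "h" then none else some v) := by
  by_cases ht : t == "h" <;> simp [pvFL, List.find?, ht]

theorem pvFoldA_eq (l : List (Int × String)) : ∀ (n : Int) (hi lo : Option Int),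
    (PySem.List.enumerate l n).foldl
      (fun (s : Option Int × Option Int) p =>
        let guess := p.2
        if guess.2 == "h" then (some guess.1, s.2) else (s.1, some guess.1))
      (hi, lo)
    = ((pvFH l.reverse).or hi, (pvFL l.reverse).or lo) := by
  induction l with
  | nil => intro n hi lo; simp [PySem.List.enumerate_nil, pvFH, pvFL]
  | cons p rest ih =>
    obtain ⟨v, t⟩ := p
    intro n hi lo
    rw [PySem.List.enumerate_cons, List.foldl_cons, List.reverse_cons,
      pvFH_append, pvFL_append, pvFH_single, pvFL_single]
    by_cases ht : t == "h"
    · rw [if_pos ht, if_pos ht, if_pos ht, ih]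
      cases pvFH rest.reverse <;> cases pvFL rest.reverse <;>
        cases hi <;> cases lo <;> simp [Option.or]
    · rw [if_neg ht, if_neg ht, if_neg ht, ih]
      cases pvFH rest.reverse <;> cases pvFL rest.reverse <;>
        cases hi <;> cases lo <;> simp [Option.or]

-- ===== VERDICT (by name: the statement is the Claim_ definition above) =====
theorem getMostRecentHighAndLowGuesses_spec : Claim_equal_getMostRecentHighAndLowGuesses := by
  intro guesses _
  show _ = _
  rw [getMostRecentHighAndLowGuesses, getMostRecentHighAndLowGuesses_alt,
    pvFoldA_eq, pvAltLoop_eq]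
  cases pvFH guesses.reverse <;> cases pvFL guesses.reverse <;> rfl
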